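-- pv_equiv track=rewrite | github.com/julianbrooke/LatticeFS | multi_helper.py | get_multi_id_range_one_word
-- ===== SOURCE A (Python) =====
-- def get_multi_id_range_one_word(POSes,sentence,start,end,word_loc):
--     if sentence[word_loc] == -2:
--         return 0
--     final = 0
--     for i in range(end -1, start -1,-1):
--         if POSes[i] == -2:
--             return 0
--         if i == word_loc:
--             final = final << 18 | sentence[i]
--         else:
--             final = final << 18 | POSes[i]
--     return final
-- ===== SOURCE B (Python) =====
-- def _pack(vals):
--     n = len(vals)
--     if n == 0:
--         return 0
--     if n == 1:
--         return vals[0]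
--     mid = n // 2
--     return _pack(vals[mid:]) << (18 * mid) | _pack(vals[:mid])
--
--
-- def get_multi_id_range_one_word(POSes, sentence, start, end, word_loc):
--     if sentence[word_loc] == -2:
--         return 0
--     if any(POSes[i] == -2 for i in range(start, end)):
--         return 0
--     vals = [sentence[i] if i == word_loc else POSes[i] for i in range(start, end)]
--     return _pack(vals)
-- ===== Notes on version B (the rewrite author's own statement) =====
-- stated objective: alternative
-- what changed: B replaces A's backward single-pass loop (early-exit -2 check interleaved with a running shift-accumulate) by staged passes: a -2 guard pass over the range, a pass materialising the packed values as a list, and a divide-and-conquer _pack that recursively splits the list in half and ORs the packed right half shifted by 18*mid onto the packed left half.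
-- outside the precondition, e.g. on get_multi_id_range_one_word([7, -2], [1, 1], -5, 2, 0): A returns 0, B raises IndexError
import Mathlib
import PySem

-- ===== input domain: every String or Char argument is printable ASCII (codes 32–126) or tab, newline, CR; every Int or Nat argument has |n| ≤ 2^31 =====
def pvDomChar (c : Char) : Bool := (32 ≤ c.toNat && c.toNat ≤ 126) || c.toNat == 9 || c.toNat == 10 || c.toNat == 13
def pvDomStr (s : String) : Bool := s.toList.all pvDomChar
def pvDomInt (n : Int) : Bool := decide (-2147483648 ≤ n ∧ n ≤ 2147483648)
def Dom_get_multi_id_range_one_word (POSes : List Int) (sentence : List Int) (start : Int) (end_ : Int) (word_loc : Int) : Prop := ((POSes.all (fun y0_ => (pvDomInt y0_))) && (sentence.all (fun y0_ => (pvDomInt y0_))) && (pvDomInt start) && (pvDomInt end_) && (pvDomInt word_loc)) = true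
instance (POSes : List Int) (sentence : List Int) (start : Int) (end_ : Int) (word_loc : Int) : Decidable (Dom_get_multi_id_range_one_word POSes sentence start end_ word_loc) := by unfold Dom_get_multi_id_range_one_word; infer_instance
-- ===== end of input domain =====

-- B replaces A's backward single-pass shift-accumulate loop by staged passes: first a -2 guard pass,
-- then the values of the range are materialised as a list and packed by a divide-and-conquer
-- recursion that ORs the packed right half, shifted by 18*mid, onto the packed left half.

-- ===== PORT A =====
-- the loop 'for i in range(end-1, start-1, -1)': early return 0 on POSes[i] == -2, else shift-accumulate
def pvLoopA (POSes sentence : List Int) (word_loc : Int) : List Int → Int → Int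
  | [], final => final
  | i :: rest, final =>
    if PySem.List.pyGetD POSes i 0 = -2 then 0
    else if i = word_loc then
      pvLoopA POSes sentence word_loc rest (PySem.Int.bor (final <<< (18:Nat)) (PySem.List.pyGetD sentence i 0))
    else
      pvLoopA POSes sentence word_loc rest (PySem.Int.bor (final <<< (18:Nat)) (PySem.List.pyGetD POSes i 0))

def get_multi_id_range_one_word (POSes : List Int) (sentence : List Int) (start : Int) (end_ : Int) (word_loc : Int) : Int :=
  if PySem.List.pyGetD sentence word_loc 0 = -2 then 0
  else pvLoopA POSes sentence word_loc (PySem.List.pyRange (end_ - 1) (start - 1) (-1)) 0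

-- ===== PORT B =====
-- '_pack(vals)': divide and conquer; vals[mid:] → List.drop, vals[:mid] → List.take (exact on the
-- nonnegative in-range slice bounds _pack uses)
def pvPack : List Int → Int
  | [] => 0
  | [v] => v
  | v₁ :: v₂ :: rest =>
    let vals := v₁ :: v₂ :: rest
    let mid := vals.length / 2
    PySem.Int.bor (pvPack (vals.drop mid) <<< (18 * mid)) (pvPack (vals.take mid))
  termination_by vals => vals.length
  decreasing_by
  · simp [List.length_drop]; omega
  · simp [List.length_take]; omega

def get_multi_id_range_one_word_alt (POSes : List Int) (sentence : List Int) (start : Int) (end_ : Int) (word_loc : Int) : Int :=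
  if PySem.List.pyGetD sentence word_loc 0 = -2 then 0
  else if (PySem.List.pyRange start end_ 1).any (fun i => PySem.List.pyGetD POSes i 0 == -2) then 0
  else pvPack ((PySem.List.pyRange start end_ 1).map
      (fun i => if i = word_loc then PySem.List.pyGetD sentence i 0 else PySem.List.pyGetD POSes i 0))

-- ===== PRECONDITION & SPEC =====
-- Pre_ requires word_loc to be a valid index of sentence and every i in range(start, end) to be a valid
-- index of POSes; it excludes out-of-bounds inputs where A may still return 0 only because the -2 guard or
-- a -2 entry is reached before the invalid index — which access raises first is an artefact of scan order.
def Pre_get_multi_id_range_one_word (POSes : List Int) (sentence : List Int) (start : Int) (end_ : Int) (word_loc : Int) : Prop :=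
  PySem.Raise.InRange sentence.length word_loc ∧
    (end_ ≤ start ∨ (-(POSes.length : Int) ≤ start ∧ end_ ≤ (POSes.length : Int)))
instance (POSes : List Int) (sentence : List Int) (start : Int) (end_ : Int) (word_loc : Int) : Decidable (Pre_get_multi_id_range_one_word POSes sentence start end_ word_loc) := by unfold Pre_get_multi_id_range_one_word; infer_instance

def pvWitness_get_multi_id_range_one_word : List Int × List Int × Int × Int × Int := ([1, 2, 3], [4, 5, 6], 0, 3, 1)

def Spec_get_multi_id_range_one_word (POSes : List Int) (sentence : List Int) (start : Int) (end_ : Int) (word_loc : Int) (out : Int) : Prop := out = get_multi_id_range_one_word_alt POSes sentence start end_ word_loc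
instance (POSes : List Int) (sentence : List Int) (start : Int) (end_ : Int) (word_loc : Int) (out : Int) : Decidable (Spec_get_multi_id_range_one_word POSes sentence start end_ word_loc out) := by unfold Spec_get_multi_id_range_one_word; infer_instance

-- ===== CLAIM (what is proved, stated in full; the proofs are below) =====
def Claim_equal_get_multi_id_range_one_word : Prop := ∀ (POSes : List Int) (sentence : List Int) (start : Int) (end_ : Int) (word_loc : Int), Dom_get_multi_id_range_one_word POSes sentence start end_ word_loc → Pre_get_multi_id_range_one_word POSes sentence start end_ word_loc → Spec_get_multi_id_range_one_word POSes sentence start end_ word_loc (get_multi_id_range_one_word POSes sentence start end_ word_loc)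

-- ===== LEMMAS AND PROOFS =====

-- ---- Nat-level bit lemmas ----

theorem pvNatDisjAddOr (x : Nat) : ∀ y, x &&& y = 0 → x + y = x ||| y := by
  induction x using Nat.strong_induction_on with
  | _ x IH =>
    intro y h
    rcases Nat.eq_zero_or_pos x with hx | hx
    · simp [hx]
    · have hd : x / 2 &&& y / 2 = 0 := by rw [← Nat.and_div_two, h]
      have ih := IH (x / 2) (Nat.div_lt_self hx (by norm_num)) (y / 2) hd
      have hor2 : (x ||| y) % 2 = x % 2 ||| y % 2 := by
        simp [← Nat.and_one_is_mod, Nat.and_or_distrib_right]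
      have hordiv : (x ||| y) / 2 = x / 2 ||| y / 2 := Nat.or_div_two
      have hand2 : x % 2 &&& y % 2 = 0 := by
        have h2 : (x &&& y) % 2 = x % 2 &&& y % 2 := by
          simp [← Nat.and_one_is_mod]; ac_rfl
        rw [h] at h2; simpa using h2.symm
      have hx2 := Nat.div_add_mod x 2
      have hy2 := Nat.div_add_mod y 2
      have hxy2 := Nat.div_add_mod (x ||| y) 2
      rcases Nat.mod_two_eq_zero_or_one x with p0 | p1 <;>
        rcases Nat.mod_two_eq_zero_or_one y with q0 | q1
      · rw [p0, q0] at hor2; simp at hor2; omega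
      · rw [p0, q1] at hor2; rw [show (0 ||| 1 : Nat) = 1 from rfl] at hor2; omega
      · rw [p1, q0] at hor2; rw [show (1 ||| 0 : Nat) = 1 from rfl] at hor2; omega
      · rw [p1, q1] at hand2; simp at hand2

theorem pvNatLdiffDisj (m n : Nat) : Nat.ldiff m n &&& (m &&& n) = 0 := by
  apply Nat.eq_of_testBit_eq
  intro i
  simp only [Nat.testBit_and, Nat.testBit_ldiff, Nat.zero_testBit]
  cases m.testBit i <;> cases n.testBit i <;> rfl

theorem pvNatLdiffOrAnd (m n : Nat) : Nat.ldiff m n ||| (m &&& n) = m := by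
  apply Nat.eq_of_testBit_eq
  intro i
  simp only [Nat.testBit_or, Nat.testBit_and, Nat.testBit_ldiff]
  cases m.testBit i <;> cases n.testBit i <;> rfl

theorem pvNatSubAnd (m n : Nat) : m - (m &&& n) = Nat.ldiff m n := by
  have h := pvNatDisjAddOr _ _ (pvNatLdiffDisj m n)
  rw [pvNatLdiffOrAnd] at h
  omega

-- ---- Int testBit machinery ----

theorem pvTbNatCast (m : Nat) (i : Nat) : Int.testBit (m : Int) i = m.testBit i := rfl

theorem pvTbNegSucc (m : Nat) (i : Nat) : Int.testBit (Int.negSucc m) i = !(m.testBit i) := rfl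

theorem pvNegRep (X : Nat) : -(X : Int) - 1 = Int.negSucc X := by
  rw [Int.negSucc_eq]; ring

theorem pvTbExt (x y : Int) (h : ∀ i, Int.testBit x i = Int.testBit y i) : x = y := by
  cases x with
  | ofNat m =>
    cases y with
    | ofNat n => exact congrArg Int.ofNat (Nat.eq_of_testBit_eq fun i => h i)
    | negSucc n =>
      exfalso
      have h1 : m.testBit (m + n) = false :=
        Nat.testBit_eq_false_of_lt
          (lt_of_lt_of_le Nat.lt_two_pow_self (Nat.pow_le_pow_right (by norm_num) (Nat.le_add_right m n)))
      have h2 : n.testBit (m + n) = false :=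
        Nat.testBit_eq_false_of_lt
          (lt_of_lt_of_le Nat.lt_two_pow_self (Nat.pow_le_pow_right (by norm_num) (Nat.le_add_left n m)))
      have := h (m + n)
      rw [pvTbNegSucc] at this
      rw [show Int.testBit (Int.ofNat m) (m + n) = m.testBit (m + n) from rfl] at this
      rw [h1, h2] at this
      simp at this
  | negSucc m =>
    cases y with
    | ofNat n =>
      exfalso
      have h1 : m.testBit (m + n) = false :=
        Nat.testBit_eq_false_of_lt
          (lt_of_lt_of_le Nat.lt_two_pow_self (Nat.pow_le_pow_right (by norm_num) (Nat.le_add_right m n)))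
      have h2 : n.testBit (m + n) = false :=
        Nat.testBit_eq_false_of_lt
          (lt_of_lt_of_le Nat.lt_two_pow_self (Nat.pow_le_pow_right (by norm_num) (Nat.le_add_left n m)))
      have := h (m + n)
      rw [pvTbNegSucc] at this
      rw [show Int.testBit (Int.ofNat n) (m + n) = n.testBit (m + n) from rfl] at this
      rw [h1, h2] at this
      simp at this
    | negSucc n =>
      refine congrArg Int.negSucc (Nat.eq_of_testBit_eq fun i => ?_)
      have := h i
      rw [pvTbNegSucc, pvTbNegSucc] at this
      exact Bool.not_inj this

theorem pvNatCastShift (m n : Nat) : ((m : Int)) <<< n = ((m <<< n : Nat) : Int) := by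
  rw [Int.shiftLeft_eq, Nat.shiftLeft_eq]
  push_cast
  ring

theorem pvNegSuccShift (m n : Nat) :
    (Int.negSucc m) <<< n = Int.negSucc (2 ^ n * m + (2 ^ n - 1)) := by
  have h1 : (1 : Nat) ≤ 2 ^ n := Nat.one_le_two_pow
  rw [Int.shiftLeft_eq, Int.negSucc_eq, Int.negSucc_eq]
  push_cast [h1]
  ring

theorem pvTbShift (a : Int) (n i : Nat) :
    Int.testBit (a <<< n) i = (decide (n ≤ i) && Int.testBit a (i - n)) := by
  cases a with
  | ofNat m =>
    rw [show ((Int.ofNat m) : Int) = ((m : Nat) : Int) from rfl, pvNatCastShift,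
      pvTbNatCast, pvTbNatCast, Nat.testBit_shiftLeft]
  | negSucc m =>
    rw [pvNegSuccShift, pvTbNegSucc, pvTbNegSucc]
    rw [Nat.testBit_two_pow_mul_add m (by have := Nat.one_le_two_pow (n := n); omega) i]
    rcases Nat.lt_or_ge i n with h | h
    · rw [if_pos h, Nat.testBit_two_pow_sub_one]
      simp [h, Nat.not_le.mpr h]
    · rw [if_neg (Nat.not_lt.mpr h)]
      simp [h]

theorem pvTbBor (a b : Int) (i : Nat) :
    Int.testBit (PySem.Int.bor a b) i = (Int.testBit a i || Int.testBit b i) := by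
  cases a with
  | ofNat m =>
    cases b with
    | ofNat n =>
      have : PySem.Int.bor (Int.ofNat m) (Int.ofNat n) = ((m ||| n : Nat) : Int) := by
        unfold PySem.Int.bor
        rw [if_pos (by exact Int.ofNat_nonneg m), if_pos (by exact Int.ofNat_nonneg n)]
        rfl
      rw [this, pvTbNatCast]
      rw [show Int.testBit (Int.ofNat m) i = m.testBit i from rfl,
        show Int.testBit (Int.ofNat n) i = n.testBit i from rfl, Nat.testBit_or]
    | negSucc n =>
      have hb : ¬ (0 : Int) ≤ Int.negSucc n := by
        rw [Int.negSucc_eq]; omega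
      have hto : (-(Int.negSucc n) - 1).toNat = n := by
        rw [Int.negSucc_eq]; omega
      have : PySem.Int.bor (Int.ofNat m) (Int.negSucc n) =
          Int.negSucc (Nat.ldiff n m) := by
        unfold PySem.Int.bor
        rw [if_pos (by exact Int.ofNat_nonneg m), if_neg hb, hto,
          show (Int.ofNat m).toNat = m from rfl, pvNatSubAnd, pvNegRep]
      rw [this, pvTbNegSucc, pvTbNegSucc,
        show Int.testBit (Int.ofNat m) i = m.testBit i from rfl, Nat.testBit_ldiff]
      cases m.testBit i <;> cases n.testBit i <;> rfl
  | negSucc m =>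
    have ha : ¬ (0 : Int) ≤ Int.negSucc m := by
      rw [Int.negSucc_eq]; omega
    have hma : (-(Int.negSucc m) - 1).toNat = m := by
      rw [Int.negSucc_eq]; omega
    cases b with
    | ofNat n =>
      have : PySem.Int.bor (Int.negSucc m) (Int.ofNat n) =
          Int.negSucc (Nat.ldiff m n) := by
        unfold PySem.Int.bor
        rw [if_neg ha, if_pos (by exact Int.ofNat_nonneg n), hma,
          show (Int.ofNat n).toNat = n from rfl, pvNatSubAnd, pvNegRep]
      rw [this, pvTbNegSucc, pvTbNegSucc,
        show Int.testBit (Int.ofNat n) i = n.testBit i from rfl, Nat.testBit_ldiff]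
      cases m.testBit i <;> cases n.testBit i <;> rfl
    | negSucc n =>
      have hb : ¬ (0 : Int) ≤ Int.negSucc n := by
        rw [Int.negSucc_eq]; omega
      have hmb : (-(Int.negSucc n) - 1).toNat = n := by
        rw [Int.negSucc_eq]; omega
      have : PySem.Int.bor (Int.negSucc m) (Int.negSucc n) =
          Int.negSucc (m &&& n) := by
        unfold PySem.Int.bor
        rw [if_neg ha, if_neg hb, hma, hmb, pvNegRep]
      rw [this, pvTbNegSucc, pvTbNegSucc, pvTbNegSucc, Nat.testBit_and]
      cases m.testBit i <;> cases n.testBit i <;> rfl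

-- ---- Int bit algebra ----

theorem pvBorAssoc (a b c : Int) :
    PySem.Int.bor (PySem.Int.bor a b) c = PySem.Int.bor a (PySem.Int.bor b c) := by
  apply pvTbExt
  intro i
  simp [pvTbBor, Bool.or_assoc]

theorem pvBorShift (a b : Int) (n : Nat) :
    (PySem.Int.bor a b) <<< n = PySem.Int.bor (a <<< n) (b <<< n) := by
  apply pvTbExt
  intro i
  simp only [pvTbBor, pvTbShift]
  cases decide (n ≤ i) <;> simp

theorem pvShiftShift (a : Int) (m n : Nat) : (a <<< m) <<< n = a <<< (m + n) := by
  rw [Int.shiftLeft_eq, Int.shiftLeft_eq, Int.shiftLeft_eq, pow_add]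
  ring

theorem pvShiftZero (a : Int) : a <<< (0 : Nat) = a := by
  rw [Int.shiftLeft_eq]; simp

-- ---- the packed value as a head-recursive function ----

def pvVal (POSes sentence : List Int) (word_loc i : Int) : Int :=
  if i = word_loc then PySem.List.pyGetD sentence i 0 else PySem.List.pyGetD POSes i 0

def pvStepA (POSes sentence : List Int) (word_loc : Int) (acc i : Int) : Int :=
  PySem.Int.bor (acc <<< (18:Nat)) (pvVal POSes sentence word_loc i)

def pvG : List Int → Int
  | [] => 0
  | v :: xs => PySem.Int.bor (pvG xs <<< (18:Nat)) v

theorem pvG_append (l r : List Int) :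
    pvG (l ++ r) = PySem.Int.bor (pvG r <<< (18 * l.length : Nat)) (pvG l) := by
  induction l with
  | nil =>
    simp [pvG, pvShiftZero, PySem.Int.bor_zero]
  | cons v l ih =>
    simp only [List.cons_append, pvG, ih, pvBorShift, pvShiftShift, List.length_cons]
    rw [pvBorAssoc]
    have : 18 * l.length + 18 = 18 * (l.length + 1) := by omega
    rw [this]

theorem pvPack_eq_G : ∀ vals : List Int, pvPack vals = pvG vals := by
  intro vals
  induction vals using pvPack.induct with
  | case1 => rw [pvPack]; rfl
  | case2 v =>
    rw [pvPack]
    show v = PySem.Int.bor (pvG [] <<< (18:Nat)) v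
    have hz : pvG [] <<< (18:Nat) = 0 := by
      show ((0:Int)) <<< (18:Nat) = 0
      rw [Int.shiftLeft_eq]; ring
    rw [hz, PySem.Int.bor_comm, PySem.Int.bor_zero]
  | case3 v₁ v₂ rest vals mid ih1 ih2 =>
    rw [pvPack]
    show PySem.Int.bor
        (pvPack ((v₁ :: v₂ :: rest).drop ((v₁ :: v₂ :: rest).length / 2)) <<<
          (18 * ((v₁ :: v₂ :: rest).length / 2)))
        (pvPack ((v₁ :: v₂ :: rest).take ((v₁ :: v₂ :: rest).length / 2))) =
      pvG (v₁ :: v₂ :: rest)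
    rw [ih1, ih2]
    have hmid : (v₁ :: v₂ :: rest).length / 2 ≤ (v₁ :: v₂ :: rest).length :=
      Nat.div_le_self _ _
    conv_rhs => rw [← List.take_append_drop ((v₁ :: v₂ :: rest).length / 2) (v₁ :: v₂ :: rest)]
    rw [pvG_append, List.length_take, Nat.min_eq_left hmid]

-- ---- A's loop characterisations ----

theorem pvLoopA_zero (POSes sentence : List Int) (word_loc : Int) (L : List Int) :
    ∀ acc, (∃ j ∈ L, PySem.List.pyGetD POSes j 0 = -2) →
      pvLoopA POSes sentence word_loc L acc = 0 := by
  induction L with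
  | nil => intro acc h; simp at h
  | cons i rest ih =>
    intro acc h
    by_cases hif : PySem.List.pyGetD POSes i 0 = -2
    · simp [pvLoopA, hif]
    · obtain ⟨j, hj, hjv⟩ := h
      have hjr : j ∈ rest := by
        rcases List.mem_cons.mp hj with rfl | hr
        · exact absurd hjv hif
        · exact hr
      by_cases hw : i = word_loc <;>
        simp [pvLoopA, hif, hw, ih _ ⟨j, hjr, hjv⟩]

theorem pvLoopA_fold (POSes sentence : List Int) (word_loc : Int) (L : List Int) :
    ∀ acc, (∀ j ∈ L, PySem.List.pyGetD POSes j 0 ≠ -2) →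
      pvLoopA POSes sentence word_loc L acc =
        L.foldl (pvStepA POSes sentence word_loc) acc := by
  induction L with
  | nil => intro acc _; rfl
  | cons i rest ih =>
    intro acc h
    have hif : PySem.List.pyGetD POSes i 0 ≠ -2 := h i (List.mem_cons_self ..)
    have hrest : ∀ j ∈ rest, PySem.List.pyGetD POSes j 0 ≠ -2 :=
      fun j hj => h j (List.mem_cons_of_mem _ hj)
    rcases eq_or_ne i word_loc with hw | hw
    · subst hw; simp [pvLoopA, hif, ih _ hrest, List.foldl_cons, pvStepA, pvVal]
    · simp [pvLoopA, hif, hw, ih _ hrest, List.foldl_cons, pvStepA, pvVal]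

theorem pvFoldRev (POSes sentence : List Int) (word_loc : Int) :
    ∀ is : List Int, (is.reverse).foldl (pvStepA POSes sentence word_loc) 0
      = pvG (is.map (pvVal POSes sentence word_loc)) := by
  intro is
  induction is with
  | nil => rfl
  | cons i rest ih =>
    rw [List.reverse_cons, List.foldl_append, ih]
    simp [pvStepA, pvG]

-- ---- main equivalence ----

theorem pvMain (POSes sentence : List Int) (start end_ word_loc : Int) :
    get_multi_id_range_one_word POSes sentence start end_ word_loc =
      get_multi_id_range_one_word_alt POSes sentence start end_ word_loc := by
  unfold get_multi_id_range_one_word get_multi_id_range_one_word_alt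
  by_cases hg : PySem.List.pyGetD sentence word_loc 0 = -2
  · simp [hg]
  · rw [if_neg hg, if_neg hg]
    have hrev : PySem.List.pyRange (end_ - 1) (start - 1) (-1) =
        (PySem.List.pyRange start end_ 1).reverse := by
      rw [PySem.List.pyRange_neg_one_eq_reverse,
        show start - 1 + 1 = start by ring, show end_ - 1 + 1 = end_ by ring]
    rw [hrev]
    by_cases hex : ∃ j ∈ PySem.List.pyRange start end_ 1, PySem.List.pyGetD POSes j 0 = -2
    · obtain ⟨j, hj, hjv⟩ := hex
      have hany : (PySem.List.pyRange start end_ 1).any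
          (fun i => PySem.List.pyGetD POSes i 0 == -2) = true :=
        List.any_eq_true.mpr ⟨j, hj, by simpa using hjv⟩
      rw [pvLoopA_zero POSes sentence word_loc _ 0 ⟨j, List.mem_reverse.mpr hj, hjv⟩, hany]
      rfl
    · have hany : (PySem.List.pyRange start end_ 1).any
          (fun i => PySem.List.pyGetD POSes i 0 == -2) = false := by
        rw [List.any_eq_false]
        intro j hj
        simp only [beq_iff_eq]
        exact fun hv => hex ⟨j, hj, hv⟩
      rw [hany]
      rw [not_exists] at hex
      simp only [not_and] at hex
      have hex' : ∀ j ∈ PySem.List.pyRange start end_ 1, PySem.List.pyGetD POSes j 0 ≠ -2 :=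
        fun j hj => hex j hj
      rw [pvLoopA_fold POSes sentence word_loc _ 0
        (fun j hj => hex' j (List.mem_reverse.mp hj))]
      rw [pvFoldRev, pvPack_eq_G]
      rfl

-- ===== VERDICT (by name: the statement is the Claim_ definition above) =====
theorem get_multi_id_range_one_word_spec : Claim_equal_get_multi_id_range_one_word := by
  intro POSes sentence start end_ word_loc _ _
  unfold Spec_get_multi_id_range_one_word
  exact pvMain POSes sentence start end_ word_loc
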